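-- pv_equiv track=rewrite | github.com/wenion/h | h/views/api/data_comics_process.py | process_serialize
-- ===== SOURCE A (Python) =====
-- def process_serialize(data):
--     # Ensure data is a list of dictionaries
--     if not isinstance(data, list):
--         raise ValueError("Data should be a list of dictionaries")
--
--     # Initialize variables to track the last KM_Process and image value
--     last_km_process = None
--     seq_counter = 0
--
--     for entry in data:
--         current_km_process = entry.get("KM_Process")
--
--         # Increment image_counter if KM_Process changes
--         if current_km_process != last_km_process:
--             seq_counter += 1
--             last_km_process = current_km_process
--
--         # Update the image value in the entry
--         entry["seq_counter"] = seq_counter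
--
--     return data
-- ===== SOURCE B (Python) =====
-- from itertools import accumulate
--
-- def process_serialize(data):
--     # Staged, data-flow style: extract keys, mark change positions, prefix-sum
--     # the change flags, then stamp each entry with its counter (in place, like A).
--     if not isinstance(data, list):
--         raise ValueError("Data should be a list of dictionaries")
--     keys = [e.get("KM_Process") for e in data]
--     flags = [int(k != p) for k, p in zip(keys, [None] + keys[:-1])]
--     for entry, c in zip(data, accumulate(flags)):
--         entry["seq_counter"] = c
--     return data
-- ===== Notes on version B (the rewrite author's own statement) =====
-- stated objective: alternative
-- what changed: Replaced the single stateful loop (last-key register plus running counter updated per entry) by three staged passes: extract the key column, compute 0/1 change flags by comparing the key list with its shifted copy, prefix-sum the flags with itertools.accumulate, and finally stamp each entry with its counter.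
import Mathlib
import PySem

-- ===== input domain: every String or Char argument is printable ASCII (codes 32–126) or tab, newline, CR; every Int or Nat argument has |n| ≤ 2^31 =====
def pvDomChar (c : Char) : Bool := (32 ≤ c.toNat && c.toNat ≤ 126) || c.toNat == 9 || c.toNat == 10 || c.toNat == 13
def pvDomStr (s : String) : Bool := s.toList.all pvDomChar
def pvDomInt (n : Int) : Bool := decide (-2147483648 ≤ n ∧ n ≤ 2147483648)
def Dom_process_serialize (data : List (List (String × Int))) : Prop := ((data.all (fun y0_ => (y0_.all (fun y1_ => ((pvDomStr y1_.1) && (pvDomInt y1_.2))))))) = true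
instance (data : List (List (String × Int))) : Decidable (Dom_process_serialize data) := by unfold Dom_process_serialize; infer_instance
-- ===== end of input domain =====

-- B replaces A's single stateful loop by three staged passes (key column, 0/1 change
-- flags against the shifted key list, prefix sums, stamp); same O(n) cost.
-- Both Pythons mutate the entries in place; the equivalence proved is about the return value.

-- entry.get("KM_Process")
def psGetKM (e : List (String × Int)) : Option Int := (PySem.Dict.mk e).get? "KM_Process"
-- entry["seq_counter"] = s
def psSetSeq (s : Int) (e : List (String × Int)) : List (String × Int) :=
  ((PySem.Dict.mk e).insert "seq_counter" s).items

-- ===== PORT A =====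
-- the loop 'for entry in data' with state (last_km_process, seq_counter)
def psGoA (last : Option Int) (seq : Int) : List (List (String × Int)) → List (List (String × Int))
  | [] => []
  | e :: es =>
    let cur := psGetKM e
    if cur ≠ last then psSetSeq (seq + 1) e :: psGoA cur (seq + 1) es
    else psSetSeq seq e :: psGoA last seq es

def process_serialize (data : List (List (String × Int))) : List (List (String × Int)) :=
  psGoA none 0 data

-- ===== PORT B =====
-- itertools.accumulate with running total starting at 0
def psAccum (acc : Int) : List Int → List Int
  | [] => []
  | x :: xs => (acc + x) :: psAccum (acc + x) xs

def process_serialize_alt (data : List (List (String × Int))) : List (List (String × Int)) :=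
  let keys := data.map psGetKM
  let flags := (keys.zip (none :: keys.dropLast)).map
    (fun kp => if kp.1 ≠ kp.2 then (1 : Int) else 0)
  (data.zip (psAccum 0 flags)).map (fun ec => psSetSeq ec.2 ec.1)

-- ===== PRECONDITION & SPEC =====
def Spec_process_serialize (data : List (List (String × Int))) (out : List (List (String × Int))) : Prop := out = process_serialize_alt data
instance (data : List (List (String × Int))) (out : List (List (String × Int))) : Decidable (Spec_process_serialize data out) := by unfold Spec_process_serialize; infer_instance

-- ===== CLAIM (what is proved, stated in full; the proofs are below) =====
def Claim_equal_process_serialize : Prop := ∀ (data : List (List (String × Int))), Dom_process_serialize data → Spec_process_serialize data (process_serialize data)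

-- ===== LEMMAS AND PROOFS =====

-- flags computed recursively, carrying the previous key
def psFlagsAux (prev : Option Int) : List (Option Int) → List Int
  | [] => []
  | k :: ks => (if k ≠ prev then (1 : Int) else 0) :: psFlagsAux k ks

theorem psZip_flags (ks : List (Option Int)) : ∀ (p : Option Int),
    (ks.zip (p :: ks.dropLast)).map (fun kp => if kp.1 ≠ kp.2 then (1 : Int) else 0)
      = psFlagsAux p ks := by
  induction ks with
  | nil => intro p; rfl
  | cons k ks ih =>
    intro p
    cases ks with
    | nil => simp [psFlagsAux]
    | cons k' ks' =>
      rw [List.dropLast_cons₂, List.zip_cons_cons, List.map_cons, ih k]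
      simp [psFlagsAux]

theorem psGoA_eq (ds : List (List (String × Int))) : ∀ (prev : Option Int) (seq : Int),
    psGoA prev seq ds
      = (ds.zip (psAccum seq (psFlagsAux prev (ds.map psGetKM)))).map
          (fun ec => psSetSeq ec.2 ec.1) := by
  induction ds with
  | nil => intro prev seq; rfl
  | cons e es ih =>
    intro prev seq
    by_cases h : psGetKM e ≠ prev
    · simp only [psGoA, List.map_cons, psFlagsAux, psAccum, List.zip_cons_cons, ih]
      rw [if_pos h, if_pos h]
    · simp only [psGoA, List.map_cons, psFlagsAux, psAccum, List.zip_cons_cons, ih]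
      rw [if_neg h, if_neg h, add_zero, not_not.mp h]

-- ===== VERDICT (by name: the statement is the Claim_ definition above) =====
theorem process_serialize_spec : Claim_equal_process_serialize := by
  intro data _
  show psGoA none 0 data =
    (data.zip (psAccum 0 (((data.map psGetKM).zip (none :: (data.map psGetKM).dropLast)).map
      (fun kp => if kp.1 ≠ kp.2 then (1 : Int) else 0)))).map (fun ec => psSetSeq ec.2 ec.1)
  rw [psZip_flags, psGoA_eq]
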